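-- pv_equiv track=rewrite | github.com/YashB63/GFG-Daily-Questions | Day 559/Minimum Time/minimum_time.py | minTimeForWritingChars
-- ===== SOURCE A (Python) =====
-- def minTimeForWritingChars(N, I, D, C):
--     dp = [0] * (N + 1)
--     dp[1] = I
--
--     for idx in range(2, N + 1):
--         if idx % 2 == 0:
--             dp[idx] = min(dp[idx - 1] + I, dp[idx // 2] + C)
--
--         else:
--             dp[idx] = min(dp[idx - 1] + I, dp[(idx + 1) // 2] + C + D)
--
--     return dp[-1]
-- ===== SOURCE B (Python) =====
-- def minTimeForWritingChars(N, I, D, C):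
--     # Forward (push) DP over the operation graph: node m relaxes its three
--     # outgoing edges m -> m+1 (insert, cost I), m -> 2m (copy, cost C),
--     # m -> 2m-1 (copy then delete one, cost C+D), instead of A's backward
--     # pull recurrence.
--     best = [None] * (N + 1)
--     best[1] = I
--     for m in range(1, N + 1):
--         b = best[m]
--         for t, w in ((m + 1, I), (2 * m, C), (2 * m - 1, C + D)):
--             if 1 < t <= N:
--                 c = b + w
--                 if best[t] is None or c < best[t]:
--                     best[t] = c
--     return best[N]
-- ===== Notes on version B (the rewrite author's own statement) =====
-- stated objective: alternative
-- what changed: Replaces A's backward pull-DP (each cell takes the min of its two predecessor cells) by a forward edge-relaxation push-DP over the operation graph (each reached count m relaxes its insert/copy/copy-and-delete successors m+1, 2m, 2m-1); exact even for negative costs, which rules out the O(log N) greedy.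
import Mathlib
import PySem

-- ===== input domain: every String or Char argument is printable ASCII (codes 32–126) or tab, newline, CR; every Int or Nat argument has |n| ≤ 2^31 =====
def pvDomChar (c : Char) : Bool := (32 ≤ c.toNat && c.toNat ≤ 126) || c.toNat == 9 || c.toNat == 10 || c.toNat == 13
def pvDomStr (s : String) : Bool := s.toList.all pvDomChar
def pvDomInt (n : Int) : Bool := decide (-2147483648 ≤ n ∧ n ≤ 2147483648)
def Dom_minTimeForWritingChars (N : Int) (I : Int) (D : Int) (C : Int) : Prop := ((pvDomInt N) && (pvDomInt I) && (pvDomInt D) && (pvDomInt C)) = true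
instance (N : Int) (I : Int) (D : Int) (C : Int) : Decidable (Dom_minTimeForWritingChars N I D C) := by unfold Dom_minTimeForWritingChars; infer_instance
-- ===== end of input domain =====

-- B replaces A's backward pull-DP by a forward edge-relaxation (push) DP over the
-- operation graph; same O(N) cost, genuinely different traversal (objective: alternative).


-- ===== PORT A =====
-- dp is an Array for O(1) reads/writes; all indices touched by the loop are ≥ 1 (idx runs
-- from 2, idx-1 ≥ 1, idx//2 ≥ 1), so the .toNat conversions are exact on every input
-- admitted by Pre_ (N ≥ 1); setIfInBounds/getD are exercised only in range there, matching
-- Python's dp[i] exactly.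
def minTimeForWritingChars (N : Int) (I : Int) (D : Int) (C : Int) : Int :=
  let dp := Array.replicate (N + 1).toNat (0 : Int)    -- dp = [0] * (N + 1)
  let dp := dp.setIfInBounds 1 I                       -- dp[1] = I
  let dp := (PySem.List.pyRange 2 (N + 1) 1).foldl (fun dp idx =>
    if PySem.Int.mod idx 2 == 0 then
      dp.setIfInBounds idx.toNat
        (min (dp.getD (idx - 1).toNat 0 + I)
             (dp.getD (PySem.Int.floordiv idx 2).toNat 0 + C))
    else
      dp.setIfInBounds idx.toNat
        (min (dp.getD (idx - 1).toNat 0 + I)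
             (dp.getD (PySem.Int.floordiv (idx + 1) 2).toNat 0 + C + D))) dp
  dp.getD (dp.size - 1) 0                              -- return dp[-1] (dp nonempty under Pre_)

-- ===== PORT B =====
-- inner 'for t, w in ((m+1, I), (2*m, C), (2*m-1, C+D))' body of Source B; the guard
-- 1 < t <= N keeps every executed access in range, so setIfInBounds/getD match Python
def pvRelax (N : Int) (b : Int) (best : Array (Option Int)) (tw : Int × Int) : Array (Option Int) :=
  if 1 < tw.1 ∧ tw.1 ≤ N then
    let c := b + tw.2
    match best.getD tw.1.toNat none with
    | none => best.setIfInBounds tw.1.toNat (some c)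
    | some v => if c < v then best.setIfInBounds tw.1.toNat (some c) else best
  else best

def minTimeForWritingChars_alt (N : Int) (I : Int) (D : Int) (C : Int) : Int :=
  let best := Array.replicate (N + 1).toNat (none : Option Int)   -- best = [None] * (N + 1)
  let best := best.setIfInBounds 1 (some I)                       -- best[1] = I
  let best := (PySem.List.pyRange 1 (N + 1) 1).foldl (fun best m =>
    let b := (best.getD m.toNat none).getD 0   -- b = best[m]; never None when reached (default unreachable)
    [(m + 1, I), (2 * m, C), (2 * m - 1, C + D)].foldl (pvRelax N b) best) best
  (best.getD N.toNat none).getD 0              -- return best[N]; an int (default unreachable)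

-- ===== PRECONDITION & SPEC =====
-- Pre_ excludes N <= 0, where A raises IndexError (dp[1] = I on a list of length <= 1);
-- B raises IndexError there as well.
def Pre_minTimeForWritingChars (N : Int) (I : Int) (D : Int) (C : Int) : Prop := 1 ≤ N
instance (N : Int) (I : Int) (D : Int) (C : Int) : Decidable (Pre_minTimeForWritingChars N I D C) := by unfold Pre_minTimeForWritingChars; infer_instance
def pvWitness_minTimeForWritingChars : Int × Int × Int × Int := (5, 2, 1, 3)

def Spec_minTimeForWritingChars (N : Int) (I : Int) (D : Int) (C : Int) (out : Int) : Prop := out = minTimeForWritingChars_alt N I D C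
instance (N : Int) (I : Int) (D : Int) (C : Int) (out : Int) : Decidable (Spec_minTimeForWritingChars N I D C out) := by unfold Spec_minTimeForWritingChars; infer_instance

-- ===== CLAIM (what is proved, stated in full; the proofs are below) =====
def Claim_equal_minTimeForWritingChars : Prop := ∀ (N : Int) (I : Int) (D : Int) (C : Int), Dom_minTimeForWritingChars N I D C → Pre_minTimeForWritingChars N I D C → Spec_minTimeForWritingChars N I D C (minTimeForWritingChars N I D C)

-- ===== LEMMAS AND PROOFS =====

-- the loop body of port A, named for the proofs
def fA (I D C : Int) (dp : Array Int) (idx : Int) : Array Int :=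
  if PySem.Int.mod idx 2 == 0 then
    dp.setIfInBounds idx.toNat
      (min (dp.getD (idx - 1).toNat 0 + I)
           (dp.getD (PySem.Int.floordiv idx 2).toNat 0 + C))
  else
    dp.setIfInBounds idx.toNat
      (min (dp.getD (idx - 1).toNat 0 + I)
           (dp.getD (PySem.Int.floordiv (idx + 1) 2).toNat 0 + C + D))

theorem portA_eq (N I D C : Int) :
    minTimeForWritingChars N I D C =
      (let L := (PySem.List.pyRange 2 (N + 1) 1).foldl (fA I D C)
        ((Array.replicate (N + 1).toNat (0 : Int)).setIfInBounds 1 I)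
       L.getD (L.size - 1) 0) := rfl

-- the loop body of port B, named for the proofs
def fB (N I D C : Int) (best : Array (Option Int)) (m : Int) : Array (Option Int) :=
  let b := (best.getD m.toNat none).getD 0
  [(m + 1, I), (2 * m, C), (2 * m - 1, C + D)].foldl (pvRelax N b) best

theorem portB_eq (N I D C : Int) :
    minTimeForWritingChars_alt N I D C =
      (((PySem.List.pyRange 1 (N + 1) 1).foldl (fB N I D C)
          ((Array.replicate (N + 1).toNat (none : Option Int)).setIfInBounds 1 (some I))).getD
        N.toNat none).getD 0 := rfl

-- dp[n] of the shared recurrence; both ports compute this value at every cell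
def fdp (I D C : Int) : Nat → Int
  | 0 => 0
  | 1 => I
  | n + 2 =>
    if (n + 2) % 2 = 0 then
      min (fdp I D C (n + 1) + I) (fdp I D C ((n + 2) / 2) + C)
    else
      min (fdp I D C (n + 1) + I) (fdp I D C ((n + 3) / 2) + C + D)
decreasing_by all_goals omega

theorem fdp_one (I D C : Int) : fdp I D C 1 = I := by simp [fdp]

theorem fdp_succ (I D C : Int) (k : Nat) (hk : 1 ≤ k) :
    fdp I D C (k + 1) =
      if (k + 1) % 2 = 0 then
        min (fdp I D C k + I) (fdp I D C ((k + 1) / 2) + C)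
      else
        min (fdp I D C k + I) (fdp I D C ((k + 2) / 2) + C + D) := by
  obtain ⟨m, rfl⟩ : ∃ m, k = m + 1 := ⟨k - 1, by omega⟩
  rw [show m + 1 + 1 = m + 2 from rfl, fdp]

theorem pvGetD_setIfInBounds {α : Type} (a : Array α) (i j : Nat) (v d : α) :
    ((a.setIfInBounds i v).getD j d) = if i = j ∧ i < a.size then v else a.getD j d := by
  by_cases h : i = j ∧ i < a.size
  · obtain ⟨rfl, hlt⟩ := h
    simp [Array.getD, hlt]
  · by_cases hij : i = j
    · subst hij
      have hnl : ¬ i < a.size := fun hl => h ⟨rfl, hl⟩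
      simp [Array.getD, hnl]
    · by_cases hj : j < a.size <;> simp [Array.getD, hj, hij]

theorem pvGetD_arr_replicate {α : Type} (n j : Nat) (a d : α) :
    (Array.replicate n a).getD j d = if j < n then a else d := by
  by_cases h : j < n <;> simp [Array.getD, h]

theorem fA_step (I D C : Int) (L : Array Int) (k : Nat) (hk : 1 ≤ k) :
    fA I D C L ((k : Int) + 1) =
      if (k + 1) % 2 = 0 then
        L.setIfInBounds (k + 1) (min (L.getD k 0 + I) (L.getD ((k + 1) / 2) 0 + C))
      else
        L.setIfInBounds (k + 1) (min (L.getD k 0 + I) (L.getD ((k + 2) / 2) 0 + C + D)) := by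
  have hcast : (k : Int) + 1 = ((k + 1 : Nat) : Int) := by push_cast; ring
  have emod : PySem.Int.mod ((k : Int) + 1) 2 = (((k + 1) % 2 : Nat) : Int) := by
    rw [hcast]; exact_mod_cast PySem.Int.mod_natCast (k + 1) 2
  have ediv1 : PySem.Int.floordiv ((k : Int) + 1) 2 = (((k + 1) / 2 : Nat) : Int) := by
    rw [hcast]; exact_mod_cast PySem.Int.floordiv_natCast (k + 1) 2
  have ediv2 : PySem.Int.floordiv ((k : Int) + 1 + 1) 2 = (((k + 2) / 2 : Nat) : Int) := by
    rw [show (k : Int) + 1 + 1 = ((k + 2 : Nat) : Int) by push_cast; ring]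
    exact_mod_cast PySem.Int.floordiv_natCast (k + 2) 2
  have t1 : ((k : Int) + 1).toNat = k + 1 := by omega
  have t2 : ((k : Int) + 1 - 1).toNat = k := by omega
  have t3 : (PySem.Int.floordiv ((k : Int) + 1) 2).toNat = (k + 1) / 2 := by
    rw [ediv1]; omega
  have t4 : (PySem.Int.floordiv ((k : Int) + 1 + 1) 2).toNat = (k + 2) / 2 := by
    rw [ediv2]; omega
  by_cases hpar : (k + 1) % 2 = 0
  · rw [fA, emod, hpar]
    rw [t1, t2, t3]
    norm_num
  · have h1 : (k + 1) % 2 = 1 := by omega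
    rw [fA, emod, h1]
    rw [t1, t2, t4]
    norm_num [hpar]

theorem dpA_spec (I D C : Int) (n : Nat) (hn : 1 ≤ n) (k : Nat) (hk1 : 1 ≤ k) (hkn : k ≤ n) :
    ((PySem.List.pyRange 2 ((k : Int) + 1) 1).foldl (fA I D C)
        ((Array.replicate (n + 1) (0 : Int)).setIfInBounds 1 I)).size = n + 1 ∧
    ∀ j : Nat, 1 ≤ j → j ≤ k →
      ((PySem.List.pyRange 2 ((k : Int) + 1) 1).foldl (fA I D C)
        ((Array.replicate (n + 1) (0 : Int)).setIfInBounds 1 I)).getD j 0 = fdp I D C j := by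
  induction k, hk1 using Nat.le_induction with
  | base =>
    rw [show ((1 : Nat) : Int) + 1 = 2 by norm_num,
      PySem.List.pyRange_one_eq_nil (le_refl 2), List.foldl_nil]
    constructor
    · rw [Array.size_setIfInBounds, Array.size_replicate]
    · intro j hj1 hj2
      have hj : j = 1 := by omega
      subst hj
      rw [pvGetD_setIfInBounds, Array.size_replicate, if_pos ⟨rfl, by omega⟩, fdp_one]
  | succ k hk ih =>
    obtain ⟨hlen, hval⟩ := ih (by omega)
    have hsplit : PySem.List.pyRange 2 (((k + 1 : Nat) : Int) + 1) 1 =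
        PySem.List.pyRange 2 ((k : Int) + 1) 1 ++ [(k : Int) + 1] := by
      rw [show ((k + 1 : Nat) : Int) + 1 = ((k : Int) + 1) + 1 by push_cast; ring]
      exact PySem.List.pyRange_one_succ_right (by exact_mod_cast Nat.succ_le_succ hk)
    rw [hsplit, List.foldl_append, List.foldl_cons, List.foldl_nil]
    set L := (PySem.List.pyRange 2 ((k : Int) + 1) 1).foldl (fA I D C)
      ((Array.replicate (n + 1) (0 : Int)).setIfInBounds 1 I) with hL
    rw [fA_step I D C L k hk]
    have hrd1 : L.getD k 0 = fdp I D C k := hval k hk (le_refl k)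
    have hkn1 : k + 1 < n + 1 := by omega
    by_cases hpar : (k + 1) % 2 = 0
    · rw [if_pos hpar]
      have hrd2 : L.getD ((k + 1) / 2) 0 = fdp I D C ((k + 1) / 2) :=
        hval _ (by omega) (by omega)
      constructor
      · rw [Array.size_setIfInBounds, hlen]
      · intro j hj1 hj2
        rw [pvGetD_setIfInBounds, hlen]
        by_cases hjk : k + 1 = j
        · subst hjk
          rw [if_pos ⟨rfl, hkn1⟩, hrd1, hrd2, fdp_succ I D C k hk, if_pos hpar]
        · rw [if_neg (by tauto)]
          exact hval j hj1 (by omega)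
    · rw [if_neg hpar]
      have hrd2 : L.getD ((k + 2) / 2) 0 = fdp I D C ((k + 2) / 2) :=
        hval _ (by omega) (by omega)
      constructor
      · rw [Array.size_setIfInBounds, hlen]
      · intro j hj1 hj2
        rw [pvGetD_setIfInBounds, hlen]
        by_cases hjk : k + 1 = j
        · subst hjk
          rw [if_pos ⟨rfl, hkn1⟩, hrd1, hrd2, fdp_succ I D C k hk, if_neg hpar]
        · rw [if_neg (by tauto)]
          exact hval j hj1 (by omega)

theorem portA_value (I D C : Int) (n : Nat) (hn : 1 ≤ n) :
    minTimeForWritingChars ((n : Nat) : Int) I D C = fdp I D C n := by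
  have htn : (((n : Nat) : Int) + 1).toNat = n + 1 := by omega
  rw [portA_eq, htn]
  obtain ⟨hlen, hval⟩ := dpA_spec I D C n hn n hn (le_refl n)
  set L := (PySem.List.pyRange 2 ((n : Int) + 1) 1).foldl (fA I D C)
    ((Array.replicate (n + 1) (0 : Int)).setIfInBounds 1 I) with hLdef
  show L.getD (L.size - 1) 0 = fdp I D C n
  rw [hlen, Nat.add_sub_cancel]
  exact hval n hn (le_refl n)

theorem size_pvRelax (N b : Int) (best : Array (Option Int)) (tw : Int × Int) :
    (pvRelax N b best tw).size = best.size := by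
  unfold pvRelax
  split
  · split
    · rw [Array.size_setIfInBounds]
    · dsimp only
      split
      · rw [Array.size_setIfInBounds]
      · rfl
  · rfl

theorem pvRelax_skip (N b : Int) (best : Array (Option Int)) (tw : Int × Int)
    (h : ¬ (1 < tw.1 ∧ tw.1 ≤ N)) : pvRelax N b best tw = best := by
  unfold pvRelax
  rw [if_neg h]

theorem getD_pvRelax (N b w : Int) (best : Array (Option Int)) (t : Nat)
    (h2 : 2 ≤ t) (hN : (t : Int) ≤ N) (hlt : t < best.size) (j : Nat) :
    (pvRelax N b best ((t : Int), w)).getD j none =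
      if j = t then
        (match best.getD t none with
         | none => some (b + w)
         | some v => some (min (b + w) v))
      else best.getD j none := by
  unfold pvRelax
  rw [if_pos ⟨by show (1 : Int) < (t : Int); exact_mod_cast h2, hN⟩]
  simp only [Int.toNat_natCast]
  cases hc : best.getD t none with
  | none =>
    dsimp only
    rw [pvGetD_setIfInBounds]
    by_cases hj : j = t
    · subst hj
      rw [if_pos ⟨rfl, hlt⟩, if_pos rfl]
    · rw [if_neg (fun hh => hj hh.1.symm), if_neg hj]
  | some v =>
    dsimp only
    by_cases hlt2 : b + w < v
    · rw [if_pos hlt2, pvGetD_setIfInBounds]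
      by_cases hj : j = t
      · subst hj
        rw [if_pos ⟨rfl, hlt⟩, if_pos rfl, min_eq_left (le_of_lt hlt2)]
      · rw [if_neg (fun hh => hj hh.1.symm), if_neg hj]
    · rw [if_neg hlt2]
      by_cases hj : j = t
      · subst hj
        rw [if_pos rfl, hc, min_eq_right (by omega)]
      · rw [if_neg hj]

def dpB (I D C : Int) (n k : Nat) : Array (Option Int) :=
  (PySem.List.pyRange 1 ((k : Int) + 1) 1).foldl (fB ((n : Nat) : Int) I D C)
    ((Array.replicate (n + 1) (none : Option Int)).setIfInBounds 1 (some I))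

theorem dpB_succ (I D C : Int) (n k : Nat) :
    dpB I D C n (k + 1) = fB ((n : Nat) : Int) I D C (dpB I D C n k) ((k : Int) + 1) := by
  unfold dpB
  rw [show ((k + 1 : Nat) : Int) + 1 = (((k : Int) + 1) + 1) by push_cast; ring,
    PySem.List.pyRange_one_succ_right (by omega), List.foldl_append, List.foldl_cons,
    List.foldl_nil]

theorem dpB_spec (I D C : Int) (n : Nat) (hn : 1 ≤ n) (k : Nat) (hkn : k ≤ n) :
    (dpB I D C n k).size = n + 1 ∧
    (∀ t : Nat, 1 ≤ t → t ≤ k + 1 → t ≤ n →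
      (dpB I D C n k).getD t none = some (fdp I D C t)) ∧
    (∀ t : Nat, k + 2 ≤ t → t ≤ n →
      (dpB I D C n k).getD t none =
        if (t + 1) / 2 ≤ k then
          some (fdp I D C ((t + 1) / 2) + (if t % 2 = 0 then C else C + D))
        else none) := by
  induction k with
  | zero =>
    unfold dpB
    rw [show ((0 : Nat) : Int) + 1 = 1 by norm_num,
      PySem.List.pyRange_one_eq_nil (le_refl 1), List.foldl_nil]
    refine ⟨by rw [Array.size_setIfInBounds, Array.size_replicate], ?_, ?_⟩
    · intro t ht1 ht2 ht3
      have ht : t = 1 := by omega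
      subst ht
      rw [pvGetD_setIfInBounds, Array.size_replicate, if_pos ⟨rfl, by omega⟩, fdp_one]
    · intro t ht2 ht3
      rw [if_neg (by omega), pvGetD_setIfInBounds,
        if_neg (fun hh => absurd hh.1 (by omega)), pvGetD_arr_replicate]
      split <;> rfl
  | succ k ih =>
    obtain ⟨hlen, h1, h2⟩ := ih (by omega)
    have hb : ((dpB I D C n k).getD ((k : Int) + 1).toNat none).getD 0 = fdp I D C (k + 1) := by
      rw [show ((k : Int) + 1).toNat = k + 1 by omega,
        h1 (k + 1) (by omega) (le_refl _) (by omega)]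
      rfl
    have c1 : (k : Int) + 1 + 1 = ((k + 2 : Nat) : Int) := by push_cast; ring
    have c2 : 2 * ((k : Int) + 1) = ((2 * k + 2 : Nat) : Int) := by push_cast; ring
    have c3 : 2 * ((k : Int) + 1) - 1 = ((2 * k + 1 : Nat) : Int) := by push_cast; ring
    rw [dpB_succ]
    unfold fB
    rw [hb]
    simp only [List.foldl_cons, List.foldl_nil]
    rw [c3, c2, c1]
    set B := dpB I D C n k with hBdef
    set L1 := pvRelax ((n : Nat) : Int) (fdp I D C (k + 1)) B (((k + 2 : Nat) : Int), I)
      with hL1def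
    set L2 := pvRelax ((n : Nat) : Int) (fdp I D C (k + 1)) L1 (((2 * k + 2 : Nat) : Int), C)
      with hL2def
    set L3 := pvRelax ((n : Nat) : Int) (fdp I D C (k + 1)) L2 (((2 * k + 1 : Nat) : Int), C + D)
      with hL3def
    have len1 : L1.size = n + 1 := by rw [hL1def, size_pvRelax, hlen]
    have len2 : L2.size = n + 1 := by rw [hL2def, size_pvRelax, len1]
    have len3 : L3.size = n + 1 := by rw [hL3def, size_pvRelax, len2]
    have u1 : ∀ j : Nat, j ≠ k + 2 → L1.getD j none = B.getD j none := by
      intro j hj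
      by_cases hg : k + 2 ≤ n
      · rw [hL1def, getD_pvRelax _ _ _ _ (k + 2) (by omega) (by exact_mod_cast hg)
          (by omega) j, if_neg hj]
      · rw [hL1def, pvRelax_skip]
        rintro ⟨-, hb2⟩
        change ((k + 2 : Nat) : Int) ≤ ((n : Nat) : Int) at hb2
        exact hg (by exact_mod_cast hb2)
    have e1 : k + 2 ≤ n →
        L1.getD (k + 2) none =
          (match B.getD (k + 2) none with
           | none => some (fdp I D C (k + 1) + I)
           | some v => some (min (fdp I D C (k + 1) + I) v)) := by
      intro hg
      rw [hL1def, getD_pvRelax _ _ _ _ (k + 2) (by omega) (by exact_mod_cast hg)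
        (by omega) (k + 2), if_pos rfl]
    have u2 : ∀ j : Nat, j ≠ 2 * k + 2 → L2.getD j none = L1.getD j none := by
      intro j hj
      by_cases hg : 2 * k + 2 ≤ n
      · rw [hL2def, getD_pvRelax _ _ _ _ (2 * k + 2) (by omega) (by exact_mod_cast hg)
          (by omega) j, if_neg hj]
      · rw [hL2def, pvRelax_skip]
        rintro ⟨-, hb2⟩
        change ((2 * k + 2 : Nat) : Int) ≤ ((n : Nat) : Int) at hb2
        exact hg (by exact_mod_cast hb2)
    have e2 : 2 * k + 2 ≤ n →
        L2.getD (2 * k + 2) none =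
          (match L1.getD (2 * k + 2) none with
           | none => some (fdp I D C (k + 1) + C)
           | some v => some (min (fdp I D C (k + 1) + C) v)) := by
      intro hg
      rw [hL2def, getD_pvRelax _ _ _ _ (2 * k + 2) (by omega) (by exact_mod_cast hg)
        (by omega) (2 * k + 2), if_pos rfl]
    have u3 : ∀ j : Nat, (j ≠ 2 * k + 1 ∨ k = 0) → L3.getD j none = L2.getD j none := by
      intro j hj
      by_cases hg : 1 ≤ k ∧ 2 * k + 1 ≤ n
      · have hjne : j ≠ 2 * k + 1 := by
          rcases hj with hj | hj
          · exact hj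
          · omega
        rw [hL3def, getD_pvRelax _ _ _ _ (2 * k + 1) (by omega) (by exact_mod_cast hg.2)
          (by omega) j, if_neg hjne]
      · rw [hL3def, pvRelax_skip]
        rintro ⟨ha, hb2⟩
        change (1 : Int) < ((2 * k + 1 : Nat) : Int) at ha
        change ((2 * k + 1 : Nat) : Int) ≤ ((n : Nat) : Int) at hb2
        have ha' : 1 < 2 * k + 1 := by exact_mod_cast ha
        have hb' : 2 * k + 1 ≤ n := by exact_mod_cast hb2
        omega
    have e3 : 1 ≤ k → 2 * k + 1 ≤ n →
        L3.getD (2 * k + 1) none =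
          (match L2.getD (2 * k + 1) none with
           | none => some (fdp I D C (k + 1) + (C + D))
           | some v => some (min (fdp I D C (k + 1) + (C + D)) v)) := by
      intro hk1 hg
      rw [hL3def, getD_pvRelax _ _ _ _ (2 * k + 1) (by omega) (by exact_mod_cast hg)
        (by omega) (2 * k + 1), if_pos rfl]
    have hfdp2 : fdp I D C (k + 2) =
        if (k + 2) % 2 = 0 then
          min (fdp I D C (k + 1) + I) (fdp I D C ((k + 2) / 2) + C)
        else
          min (fdp I D C (k + 1) + I) (fdp I D C ((k + 3) / 2) + C + D) := by
      rw [show k + 2 = k + 1 + 1 from rfl, fdp_succ I D C (k + 1) (by omega)]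
    refine ⟨len3, ?_, ?_⟩
    · intro t ht1 ht2 ht3
      by_cases htm : t ≤ k + 1
      · have hu3 : t ≠ 2 * k + 1 ∨ k = 0 := by
          rcases Nat.eq_zero_or_pos k with hk0 | hk0
          · exact Or.inr hk0
          · exact Or.inl (by omega)
        rw [u3 t hu3, u2 t (by omega), u1 t (by omega)]
        exact h1 t ht1 htm ht3
      · have ht : t = k + 2 := by omega
        subst ht
        rcases Nat.lt_or_ge k 2 with hk2 | hk2
        · by_cases hk0 : k = 0
          · -- m = 1 : cell 2 is relaxed by both the insert and the copy edge from 1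
            rw [u3 (k + 2) (Or.inr hk0)]
            rw [show (2 : Nat) * k + 2 = k + 2 by omega] at e2
            rw [e2 (by omega), e1 (by omega), h2 (k + 2) (by omega) (by omega),
              if_neg (by omega)]
            dsimp only
            rw [hfdp2, if_pos (by omega), show (k + 2) / 2 = k + 1 by omega,
              min_comm (fdp I D C (k + 1) + C) (fdp I D C (k + 1) + I)]
          · -- m = 2 : cell 3 is relaxed by the copy-delete edge from 2 and the insert edge
            have hk1 : k = 1 := by omega
            rw [show k + 2 = 2 * k + 1 by omega]
            rw [e3 (by omega) (by omega), u2 (2 * k + 1) (by omega)]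
            rw [show (2 : Nat) * k + 1 = k + 2 by omega]
            rw [e1 (by omega), h2 (k + 2) (by omega) (by omega), if_neg (by omega)]
            dsimp only
            rw [hfdp2, if_neg (by omega), show (k + 3) / 2 = k + 1 by omega,
              show fdp I D C (k + 1) + C + D = fdp I D C (k + 1) + (C + D) by ring,
              min_comm (fdp I D C (k + 1) + (C + D)) (fdp I D C (k + 1) + I)]
        · -- m ≥ 3 : cell m+1 already holds its copy candidate; the insert edge completes it
          rw [u3 (k + 2) (Or.inl (by omega)), u2 (k + 2) (by omega), e1 (by omega),
            h2 (k + 2) (by omega) (by omega), if_pos (by omega)]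
          dsimp only
          rw [hfdp2]
          by_cases hpar : (k + 2) % 2 = 0
          · rw [if_pos hpar, if_pos hpar, show (k + 2 + 1) / 2 = (k + 2) / 2 by omega]
          · rw [if_neg hpar, if_neg hpar, show (k + 2 + 1) / 2 = (k + 3) / 2 by omega]
            congr 2
            ring
    · intro t ht2 ht3
      by_cases h2m : t = 2 * k + 2
      · subst h2m
        have hk1 : 1 ≤ k := by omega
        rw [u3 (2 * k + 2) (Or.inl (by omega)), e2 (by omega), u1 (2 * k + 2) (by omega),
          h2 (2 * k + 2) (by omega) (by omega), if_neg (by omega)]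
        dsimp only
        rw [if_pos (by omega), if_pos (by omega), show (2 * k + 2 + 1) / 2 = k + 1 by omega]
      · by_cases h2m1 : t = 2 * k + 1
        · subst h2m1
          have hk2 : 2 ≤ k := by omega
          rw [e3 (by omega) (by omega), u2 (2 * k + 1) (by omega),
            u1 (2 * k + 1) (by omega), h2 (2 * k + 1) (by omega) (by omega),
            if_neg (by omega)]
          dsimp only
          rw [if_pos (by omega), if_neg (by omega), show (2 * k + 1 + 1) / 2 = k + 1 by omega]
        · rw [u3 t (Or.inl (fun hh => h2m1 hh)), u2 t (fun hh => h2m hh),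
            u1 t (by omega), h2 t (by omega) ht3]
          by_cases hc : (t + 1) / 2 ≤ k
          · rw [if_pos hc, if_pos (show (t + 1) / 2 ≤ k + 1 by omega)]
          · rw [if_neg hc, if_neg (show ¬ (t + 1) / 2 ≤ k + 1 by omega)]

theorem portB_value (I D C : Int) (n : Nat) (hn : 1 ≤ n) :
    minTimeForWritingChars_alt ((n : Nat) : Int) I D C = fdp I D C n := by
  have htn : (((n : Nat) : Int) + 1).toNat = n + 1 := by omega
  rw [portB_eq, htn]
  obtain ⟨hlen, h1, h2⟩ := dpB_spec I D C n hn n (le_refl n)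
  rw [show ((PySem.List.pyRange 1 (((n : Nat) : Int) + 1) 1).foldl (fB ((n : Nat) : Int) I D C)
      ((Array.replicate (n + 1) (none : Option Int)).setIfInBounds 1 (some I))) =
      dpB I D C n n from rfl]
  rw [show ((n : Nat) : Int).toNat = n by omega, h1 n hn (by omega) (le_refl n)]
  rfl

-- ===== VERDICT (by name: the statement is the Claim_ definition above) =====
theorem minTimeForWritingChars_spec : Claim_equal_minTimeForWritingChars := by
  intro N I D C hdom hpre
  unfold Spec_minTimeForWritingChars
  have hN : 1 ≤ N := hpre
  obtain ⟨n, hn, rfl⟩ : ∃ n : Nat, 1 ≤ n ∧ N = ((n : Nat) : Int) :=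
    ⟨N.toNat, by omega, by omega⟩
  rw [portA_value I D C n hn, portB_value I D C n hn]
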